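-- pv_equiv track=rewrite | github.com/GabellaJhonson/Optimization_algorithms | Simplex method/main.py | select_columns
-- ===== SOURCE A (Python) =====
-- def select_columns(matrix, column_indices):
--     num_rows = len(matrix)
--     selected_columns = []
--
--     for idx in column_indices:
--         column = []
--         for i in range(num_rows):
--             column.append(matrix[i][idx])
--         selected_columns.append(column)
--
--     num_cols = len(column_indices)
--     new_matrix = []
--
--     for i in range(num_rows):
--         row = []
--         for j in range(num_cols):
--             row.append(selected_columns[j][i])
--         new_matrix.append(row)
--
--     return new_matrix
-- ===== SOURCE B (Python) =====
-- def select_columns(matrix, column_indices):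
--     return [[row[idx] for idx in column_indices] for row in matrix]
-- ===== Notes on version B (the rewrite author's own statement) =====
-- stated objective: simpler
-- what changed: B drops A's build-column-major-then-transpose two-stage shape and builds the row-major result directly in one pass over the rows with a nested comprehension.
import Mathlib
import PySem

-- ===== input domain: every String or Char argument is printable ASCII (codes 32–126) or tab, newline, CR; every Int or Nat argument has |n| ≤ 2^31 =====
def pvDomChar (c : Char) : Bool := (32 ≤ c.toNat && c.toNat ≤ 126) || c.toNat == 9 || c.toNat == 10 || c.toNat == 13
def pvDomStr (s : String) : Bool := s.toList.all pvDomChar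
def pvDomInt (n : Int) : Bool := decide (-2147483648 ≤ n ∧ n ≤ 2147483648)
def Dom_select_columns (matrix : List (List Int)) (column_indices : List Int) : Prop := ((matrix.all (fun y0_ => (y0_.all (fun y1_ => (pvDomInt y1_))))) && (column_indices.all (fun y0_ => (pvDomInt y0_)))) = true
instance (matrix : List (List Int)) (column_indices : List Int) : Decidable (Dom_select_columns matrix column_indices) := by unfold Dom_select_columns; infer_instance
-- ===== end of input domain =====

-- B replaces A's build-column-major-then-transpose two-stage construction by a direct
-- single-pass row-major nested comprehension (simpler; same asymptotic cost).


-- ===== PORT A =====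
-- literal transliteration of A: build column-major 'selected_columns', then transpose it.
def select_columns (matrix : List (List Int)) (column_indices : List Int) : List (List Int) :=
  let num_rows : Int := (matrix.length : Int)
  let selected_columns : List (List Int) :=
    column_indices.foldl (fun acc idx =>
      acc ++ [(PySem.List.pyRange 0 num_rows 1).foldl
        (fun col i => col ++ [PySem.List.pyGetD (PySem.List.pyGetD matrix i []) idx 0]) []]) []
  let num_cols : Int := (column_indices.length : Int)
  (PySem.List.pyRange 0 num_rows 1).foldl (fun nm i =>
    nm ++ [(PySem.List.pyRange 0 num_cols 1).foldl
      (fun row j => row ++ [PySem.List.pyGetD (PySem.List.pyGetD selected_columns j []) i 0]) []]) []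

-- ===== PORT B =====
def select_columns_alt (matrix : List (List Int)) (column_indices : List Int) : List (List Int) :=
  matrix.map (fun row => column_indices.map (fun idx => PySem.List.pyGetD row idx 0))

-- ===== PRECONDITION & SPEC =====
-- Pre_ excludes exactly the inputs where Python A raises IndexError: some idx out of range for some row.
def Pre_select_columns (matrix : List (List Int)) (column_indices : List Int) : Prop :=
  ∀ row ∈ matrix, ∀ idx ∈ column_indices, PySem.Raise.InRange row.length idx

instance (matrix : List (List Int)) (column_indices : List Int) : Decidable (Pre_select_columns matrix column_indices) := by unfold Pre_select_columns; infer_instance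

def pvWitness_select_columns : List (List Int) × List Int := ([[1,2,3],[4,5,6]], [2,0,-1])

def Spec_select_columns (matrix : List (List Int)) (column_indices : List Int) (out : List (List Int)) : Prop := out = select_columns_alt matrix column_indices
instance (matrix : List (List Int)) (column_indices : List Int) (out : List (List Int)) : Decidable (Spec_select_columns matrix column_indices out) := by unfold Spec_select_columns; infer_instance

-- ===== CLAIM (what is proved, stated in full; the proofs are below) =====
def Claim_equal_select_columns : Prop := ∀ (matrix : List (List Int)) (column_indices : List Int), Dom_select_columns matrix column_indices → Pre_select_columns matrix column_indices → Spec_select_columns matrix column_indices (select_columns matrix column_indices)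

-- ===== LEMMAS AND PROOFS =====

-- iterating 'range(len xs)' and indexing is mapping over xs
theorem map_range_get {α β : Type} (xs : List α) (d : α) (g : α → β) :
    (PySem.List.pyRange 0 (xs.length : Int) 1).map (fun i => g (PySem.List.pyGetD xs i d))
      = xs.map g := by
  have : (fun i => g (PySem.List.pyGetD xs i d))
      = g ∘ (fun i => PySem.List.pyGetD xs i d) := rfl
  rw [this, ← List.map_map, PySem.List.map_pyGetD_pyRange_zero']

-- ===== VERDICT (by name: the statement is the Claim_ definition above) =====
theorem select_columns_spec : Claim_equal_select_columns := by
  intro matrix column_indices _ _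
  unfold Spec_select_columns select_columns select_columns_alt
  simp only [PySem.List.foldl_append_singleton_eq_map, List.nil_append]
  rw [show ((column_indices.length : Int)) = (((column_indices.map (fun idx =>
        (PySem.List.pyRange 0 ((matrix.length : Int)) 1).map
          (fun i => PySem.List.pyGetD (PySem.List.pyGetD matrix i []) idx 0))).length : Int))
      from by simp]
  calc (PySem.List.pyRange 0 ((matrix.length : Int)) 1).map (fun i =>
          (PySem.List.pyRange 0 (((column_indices.map (fun idx =>
              (PySem.List.pyRange 0 ((matrix.length : Int)) 1).map
                (fun k => PySem.List.pyGetD (PySem.List.pyGetD matrix k []) idx 0))).length : Int)) 1).map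
            (fun j => PySem.List.pyGetD (PySem.List.pyGetD
              (column_indices.map (fun idx =>
                (PySem.List.pyRange 0 ((matrix.length : Int)) 1).map
                  (fun k => PySem.List.pyGetD (PySem.List.pyGetD matrix k []) idx 0))) j []) i 0))
      = (PySem.List.pyRange 0 ((matrix.length : Int)) 1).map (fun i =>
          column_indices.map (fun idx => PySem.List.pyGetD (PySem.List.pyGetD matrix i []) idx 0)) := by
        apply List.map_congr_left
        intro i hi
        obtain ⟨h0, hn⟩ := (PySem.List.mem_pyRange_one).1 hi
        rw [map_range_get (column_indices.map (fun idx =>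
              (PySem.List.pyRange 0 ((matrix.length : Int)) 1).map
                (fun k => PySem.List.pyGetD (PySem.List.pyGetD matrix k []) idx 0))) []
            (fun col => PySem.List.pyGetD col i 0), List.map_map]
        apply List.map_congr_left
        intro idx _
        simp only [Function.comp]
        rw [PySem.List.pyGetD_map_pyRange_of_nonneg _ _ _ _ h0 hn]
    _ = matrix.map (fun row => column_indices.map (fun idx => PySem.List.pyGetD row idx 0)) :=
        map_range_get matrix [] (fun row => column_indices.map (fun idx => PySem.List.pyGetD row idx 0))
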